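-- pv_equiv track=rewrite | github.com/CooperWisener/DelphiAI | DelphiAI_Github/webApp/portfolio/helper.py | parse_artists_and_songs
-- ===== SOURCE A (Python) =====
-- def parse_artists_and_songs(input_string):
--     # Split the input string into lines
--     lines = input_string.strip().split('\n')
--
--     # Initialize lists to store artists and songs
--     artists = []
--     songs = []
--
--     # Flags to track the current section
--     current_section = None
--
--     for line in lines:
--         line = line.strip()
--         if line.startswith("Artists:"):
--             current_section = 'artists'
--         elif line.startswith("Songs:"):
--             current_section = 'songs'
--         elif line and current_section == 'artists':
--             # Extract artist name
--             artist_name = line.split('. ', 1)[1]  # Split by '. ' and take the second part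
--             artists.append(artist_name)
--         elif line and current_section == 'songs':
--             # Extract song title
--             song_title = line.split(' - ', 1)[0]  # Split by ' - ' and take the first part
--             songs.append(song_title)
--
--     return artists, songs
-- ===== SOURCE B (Python) =====
-- def parse_artists_and_songs(input_string):
--     # Stage 1: strip all lines up front.
--     lines = [l.strip() for l in input_string.strip().split('\n')]
--     n = len(lines)
--
--     def is_header(l):
--         return l.startswith("Artists:") or l.startswith("Songs:")
--
--     artists, songs = [], []
--     # Stage 2: skip everything before the first header.
--     i = 0
--     while i < n and not is_header(lines[i]):
--         i += 1
--     # Stage 3: iterate over header-delimited segments; each segment is sliced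
--     # out as a whole block and projected with its own rule.
--     while i < n:
--         header = lines[i]
--         j = i + 1
--         while j < n and not is_header(lines[j]):
--             j += 1
--         block = [l for l in lines[i + 1:j] if l]
--         if header.startswith("Artists:"):
--             artists.extend(l.split('. ', 1)[1] for l in block)
--         else:
--             songs.extend(l.split(' - ', 1)[0] for l in block)
--         i = j
--     return artists, songs
-- ===== Notes on version B (the rewrite author's own statement) =====
-- stated objective: alternative
-- what changed: A is a single-pass per-line state machine that parses inline while tracking the current section; B strips all lines up front, skips to the first header, and then iterates over header-delimited segments, slicing out each whole block and projecting it with its section's rule, with no per-line section state.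
import Mathlib
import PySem

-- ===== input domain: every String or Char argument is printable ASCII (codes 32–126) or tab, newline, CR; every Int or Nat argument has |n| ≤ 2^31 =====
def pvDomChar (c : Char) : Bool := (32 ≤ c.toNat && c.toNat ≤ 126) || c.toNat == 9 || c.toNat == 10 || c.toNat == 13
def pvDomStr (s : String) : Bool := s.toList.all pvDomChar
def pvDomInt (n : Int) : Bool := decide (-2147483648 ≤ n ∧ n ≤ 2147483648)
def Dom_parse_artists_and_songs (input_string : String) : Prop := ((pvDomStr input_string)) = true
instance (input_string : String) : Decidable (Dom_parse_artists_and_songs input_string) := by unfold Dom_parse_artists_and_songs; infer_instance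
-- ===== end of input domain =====

-- B replaces A's per-line state machine by a segment parser: strip all lines, skip to
-- the first header, then slice out and project whole header-delimited blocks ("alternative").

-- ===== PORT A =====
-- A: single pass; parses each content line inline while scanning sections.
-- Where Python A raises IndexError (an artists line without '. '), pyGet? is none and
-- the .getD "" default is reached only outside Pre_parse_artists_and_songs.
def pvStepA (acc : List String × List String × Option String) (rawline : String) :
    List String × List String × Option String :=
  let line := PySem.Str.strip rawline
  if PySem.Str.startswith line "Artists:" then (acc.1, acc.2.1, some "artists")
  else if PySem.Str.startswith line "Songs:" then (acc.1, acc.2.1, some "songs")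
  else if (line != "") && (acc.2.2 == some "artists") then
    (acc.1 ++ [(PySem.List.pyGet? ((PySem.Str.splitMax? line ". " 1).getD []) 1).getD ""],
     acc.2.1, acc.2.2)
  else if (line != "") && (acc.2.2 == some "songs") then
    (acc.1,
     acc.2.1 ++ [(PySem.List.pyGet? ((PySem.Str.splitMax? line " - " 1).getD []) 0).getD ""],
     acc.2.2)
  else acc

def parse_artists_and_songs (input_string : String) : List String × List String :=
  let lines := (PySem.Str.split? (PySem.Str.strip input_string) "\n").getD []
  let st := lines.foldl pvStepA ([], [], none)
  (st.1, st.2.1)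

-- ===== PORT B =====
-- B: stage 1 strips every line; stage 2 skips to the first header; stage 3 iterates
-- over header-delimited segments, taking each whole block and projecting it.
-- Same .getD "" convention as port A for the line A/B raise IndexError on.
def pvProjArtist (l : String) : String :=
  (PySem.List.pyGet? ((PySem.Str.splitMax? l ". " 1).getD []) 1).getD ""

def pvProjSong (l : String) : String :=
  (PySem.List.pyGet? ((PySem.Str.splitMax? l " - " 1).getD []) 0).getD ""

def pvIsHdr (l : String) : Bool :=
  PySem.Str.startswith l "Artists:" || PySem.Str.startswith l "Songs:"

-- stage 2: the initial while loop advancing i past non-header lines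
def pvSkip : List String → List String
  | [] => []
  | hd :: tl => if pvIsHdr hd then hd :: tl else pvSkip tl

-- inner while loop: find the next header position j and slice lines[i+1:j]
def pvTakeBlock : List String → List String × List String
  | [] => ([], [])
  | hd :: tl =>
      if pvIsHdr hd then ([], hd :: tl)
      else ((pvTakeBlock tl).1.cons hd, (pvTakeBlock tl).2)

lemma pvTakeBlock_len : ∀ ls : List String, (pvTakeBlock ls).2.length ≤ ls.length := by
  intro ls
  induction ls with
  | nil => simp [pvTakeBlock]
  | cons hd tl ih =>
      by_cases h : pvIsHdr hd = true
      · simp [pvTakeBlock, h]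
      · simp only [pvTakeBlock, if_neg h]
        exact Nat.le_succ_of_le ih

-- outer while loop over segments; input is [] or starts with a header line
def pvSegLoop : List String → List String × List String
  | [] => ([], [])
  | hd :: tl =>
      let rest := pvSegLoop (pvTakeBlock tl).2
      if PySem.Str.startswith hd "Artists:" then
        (((pvTakeBlock tl).1.filter (fun l => l != "")).map pvProjArtist ++ rest.1, rest.2)
      else
        (rest.1, ((pvTakeBlock tl).1.filter (fun l => l != "")).map pvProjSong ++ rest.2)
termination_by ls => ls.length
decreasing_by
  simp only [List.length_cons]
  exact Nat.lt_succ_of_le (pvTakeBlock_len tl)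

def parse_artists_and_songs_alt (input_string : String) : List String × List String :=
  let ls := ((PySem.Str.split? (PySem.Str.strip input_string) "\n").getD []).map PySem.Str.strip
  pvSegLoop (pvSkip ls)

-- ===== PRECONDITION & SPEC =====
-- Pre_ excludes exactly the inputs on which Python A raises IndexError: a nonempty
-- non-header line whose most recent preceding header is "Artists:" but which does not
-- contain the separator '. ' (A's split('. ', 1)[1] raises there; B raises the same way).
-- Both ports use the same total .getD "" for that index, so the Lean equality below in fact
-- holds on all inputs and the proof does not need Pre_; Pre_ marks where the PYTHONS return.
def Pre_parse_artists_and_songs (input_string : String) : Prop :=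
  let lines := (PySem.Str.split? (PySem.Str.strip input_string) "\n").getD []
  ∀ i ∈ List.range lines.length,
    PySem.Str.strip (lines.getD i "") ≠ "" →
    PySem.Str.startswith (PySem.Str.strip (lines.getD i "")) "Artists:" = false →
    PySem.Str.startswith (PySem.Str.strip (lines.getD i "")) "Songs:" = false →
    (∃ j ∈ List.range i,
       PySem.Str.startswith (PySem.Str.strip (lines.getD j "")) "Artists:" = true ∧
       ∀ k ∈ List.range i, j < k →
         PySem.Str.startswith (PySem.Str.strip (lines.getD k "")) "Songs:" = false) →
    PySem.Str.isIn ". " (PySem.Str.strip (lines.getD i "")) = true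

instance (input_string : String) : Decidable (Pre_parse_artists_and_songs input_string) := by
  unfold Pre_parse_artists_and_songs; infer_instance

def pvWitness_parse_artists_and_songs : String :=
  "Artists:\n1. Alice\nSongs:\nHit - Alice"

def Spec_parse_artists_and_songs (input_string : String) (out : List String × List String) : Prop := out = parse_artists_and_songs_alt input_string
instance (input_string : String) (out : List String × List String) : Decidable (Spec_parse_artists_and_songs input_string out) := by unfold Spec_parse_artists_and_songs; infer_instance

-- ===== CLAIM (what is proved, stated in full; the proofs are below) =====
def Claim_equal_parse_artists_and_songs : Prop := ∀ (input_string : String), Dom_parse_artists_and_songs input_string → Pre_parse_artists_and_songs input_string → Spec_parse_artists_and_songs input_string (parse_artists_and_songs input_string)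

-- ===== LEMMAS AND PROOFS =====

-- Per-branch evaluation lemmas for A's step function.
lemma pv_stepA_hdrA (acc : List String × List String × Option String) (hd : String)
    (hA : PySem.Str.startswith (PySem.Str.strip hd) "Artists:" = true) :
    pvStepA acc hd = (acc.1, acc.2.1, some "artists") := by
  unfold pvStepA; rw [if_pos hA]

lemma pv_stepA_hdrS (acc : List String × List String × Option String) (hd : String)
    (hA : PySem.Str.startswith (PySem.Str.strip hd) "Artists:" = false)
    (hS : PySem.Str.startswith (PySem.Str.strip hd) "Songs:" = true) :
    pvStepA acc hd = (acc.1, acc.2.1, some "songs") := by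
  unfold pvStepA; rw [if_neg (by rw [hA]; exact Bool.false_ne_true), if_pos hS]

lemma pv_stepA_art (acc : List String × List String × Option String) (hd : String)
    (hA : PySem.Str.startswith (PySem.Str.strip hd) "Artists:" = false)
    (hS : PySem.Str.startswith (PySem.Str.strip hd) "Songs:" = false)
    (hE : PySem.Str.strip hd ≠ "") (hc : acc.2.2 = some "artists") :
    pvStepA acc hd = (acc.1 ++ [pvProjArtist (PySem.Str.strip hd)], acc.2.1, acc.2.2) := by
  unfold pvStepA pvProjArtist
  rw [if_neg (by rw [hA]; exact Bool.false_ne_true), if_neg (by rw [hS]; exact Bool.false_ne_true), if_pos (by rw [hc]; simp [bne_iff_ne, hE])]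

lemma pv_stepA_song (acc : List String × List String × Option String) (hd : String)
    (hA : PySem.Str.startswith (PySem.Str.strip hd) "Artists:" = false)
    (hS : PySem.Str.startswith (PySem.Str.strip hd) "Songs:" = false)
    (hE : PySem.Str.strip hd ≠ "") (hc : acc.2.2 = some "songs") :
    pvStepA acc hd = (acc.1, acc.2.1 ++ [pvProjSong (PySem.Str.strip hd)], acc.2.2) := by
  unfold pvStepA pvProjSong
  rw [if_neg (by rw [hA]; exact Bool.false_ne_true), if_neg (by rw [hS]; exact Bool.false_ne_true), if_neg (by rw [hc]; simp), if_pos (by rw [hc]; simp [bne_iff_ne, hE])]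

lemma pv_stepA_empty (acc : List String × List String × Option String) (hd : String)
    (hA : PySem.Str.startswith (PySem.Str.strip hd) "Artists:" = false)
    (hS : PySem.Str.startswith (PySem.Str.strip hd) "Songs:" = false)
    (hE : PySem.Str.strip hd = "") :
    pvStepA acc hd = acc := by
  unfold pvStepA
  rw [if_neg (by rw [hA]; exact Bool.false_ne_true), if_neg (by rw [hS]; exact Bool.false_ne_true), if_neg (by rw [hE]; simp), if_neg (by rw [hE]; simp)]

lemma pv_stepA_none (acc : List String × List String × Option String) (hd : String)
    (hA : PySem.Str.startswith (PySem.Str.strip hd) "Artists:" = false)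
    (hS : PySem.Str.startswith (PySem.Str.strip hd) "Songs:" = false)
    (hc : acc.2.2 = none) :
    pvStepA acc hd = acc := by
  unfold pvStepA
  rw [if_neg (by rw [hA]; exact Bool.false_ne_true), if_neg (by rw [hS]; exact Bool.false_ne_true), if_neg (by rw [hc]; simp), if_neg (by rw [hc]; simp)]

-- Rewrite lemmas for B's helpers (keep PySem.Str opaque so hypotheses apply).
lemma pvIsHdr_true_A (s : String) (h : PySem.Str.startswith s "Artists:" = true) :
    pvIsHdr s = true := by unfold pvIsHdr; rw [h]; exact Bool.true_or _

lemma pvIsHdr_true_S (s : String) (h : PySem.Str.startswith s "Songs:" = true) :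
    pvIsHdr s = true := by unfold pvIsHdr; rw [h]; exact Bool.or_true _

lemma pvIsHdr_false (s : String) (hA : PySem.Str.startswith s "Artists:" = false)
    (hS : PySem.Str.startswith s "Songs:" = false) : pvIsHdr s = false := by
  unfold pvIsHdr; rw [hA, hS]; rfl

lemma pvSkip_cons_hdr (hd : String) (tl : List String) (h : pvIsHdr hd = true) :
    pvSkip (hd :: tl) = hd :: tl := by simp [pvSkip, h]

lemma pvSkip_cons_not (hd : String) (tl : List String) (h : pvIsHdr hd = false) :
    pvSkip (hd :: tl) = pvSkip tl := by simp [pvSkip, h]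

lemma pvTakeBlock_cons_hdr (hd : String) (tl : List String) (h : pvIsHdr hd = true) :
    pvTakeBlock (hd :: tl) = ([], hd :: tl) := by simp [pvTakeBlock, h]

lemma pvTakeBlock_cons_not (hd : String) (tl : List String) (h : pvIsHdr hd = false) :
    pvTakeBlock (hd :: tl) = (hd :: (pvTakeBlock tl).1, (pvTakeBlock tl).2) := by
  simp [pvTakeBlock, h]

lemma pvSegLoop_cons_A (hd : String) (tl : List String)
    (hA : PySem.Str.startswith hd "Artists:" = true) :
    pvSegLoop (hd :: tl)
      = (((pvTakeBlock tl).1.filter (fun l => l != "")).map pvProjArtist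
            ++ (pvSegLoop (pvTakeBlock tl).2).1,
         (pvSegLoop (pvTakeBlock tl).2).2) := by
  rw [pvSegLoop]; rw [if_pos hA]

lemma pvSegLoop_cons_S (hd : String) (tl : List String)
    (hA : PySem.Str.startswith hd "Artists:" = false) :
    pvSegLoop (hd :: tl)
      = ((pvSegLoop (pvTakeBlock tl).2).1,
         ((pvTakeBlock tl).1.filter (fun l => l != "")).map pvProjSong
            ++ (pvSegLoop (pvTakeBlock tl).2).2) := by
  rw [pvSegLoop]; rw [if_neg (by rw [hA]; exact Bool.false_ne_true)]

-- The loop correspondence: A's fold from each of its three section states equals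
-- B's segment decomposition of the (stripped) remaining lines.
lemma pv_loop (ls : List String) :
    (∀ ra rs : List String, ∃ c,
      ls.foldl pvStepA (ra, rs, none)
        = (ra ++ (pvSegLoop (pvSkip (ls.map PySem.Str.strip))).1,
           rs ++ (pvSegLoop (pvSkip (ls.map PySem.Str.strip))).2, c)) ∧
    (∀ ra rs : List String, ∃ c,
      ls.foldl pvStepA (ra, rs, some "artists")
        = (ra ++ ((pvTakeBlock (ls.map PySem.Str.strip)).1.filter (fun l => l != "")).map pvProjArtist
              ++ (pvSegLoop (pvTakeBlock (ls.map PySem.Str.strip)).2).1,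
           rs ++ (pvSegLoop (pvTakeBlock (ls.map PySem.Str.strip)).2).2, c)) ∧
    (∀ ra rs : List String, ∃ c,
      ls.foldl pvStepA (ra, rs, some "songs")
        = (ra ++ (pvSegLoop (pvTakeBlock (ls.map PySem.Str.strip)).2).1,
           rs ++ ((pvTakeBlock (ls.map PySem.Str.strip)).1.filter (fun l => l != "")).map pvProjSong
              ++ (pvSegLoop (pvTakeBlock (ls.map PySem.Str.strip)).2).2, c)) := by
  induction ls with
  | nil =>
      refine ⟨fun ra rs => ⟨none, ?_⟩, fun ra rs => ⟨some "artists", ?_⟩,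
             fun ra rs => ⟨some "songs", ?_⟩⟩ <;>
        simp [pvSkip, pvTakeBlock, pvSegLoop]
  | cons hd tl ih =>
      obtain ⟨ih1, ih2, ih3⟩ := ih
      by_cases hA : PySem.Str.startswith (PySem.Str.strip hd) "Artists:" = true
      · -- header "Artists:"
        have hH := pvIsHdr_true_A _ hA
        refine ⟨?_, ?_, ?_⟩ <;> intro ra rs <;> obtain ⟨c, h⟩ := ih2 ra rs
        · refine ⟨c, ?_⟩
          simp only [List.foldl_cons, List.map_cons]
          rw [pv_stepA_hdrA (ra, rs, none) hd hA, h,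
              pvSkip_cons_hdr _ _ hH, pvSegLoop_cons_A _ _ hA]
          simp [List.append_assoc]
        · refine ⟨c, ?_⟩
          simp only [List.foldl_cons, List.map_cons]
          rw [pv_stepA_hdrA (ra, rs, some "artists") hd hA, h,
              pvTakeBlock_cons_hdr _ _ hH, pvSegLoop_cons_A _ _ hA]
          simp [List.append_assoc]
        · refine ⟨c, ?_⟩
          simp only [List.foldl_cons, List.map_cons]
          rw [pv_stepA_hdrA (ra, rs, some "songs") hd hA, h,
              pvTakeBlock_cons_hdr _ _ hH, pvSegLoop_cons_A _ _ hA]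
          simp [List.append_assoc]
      · rw [Bool.not_eq_true] at hA
        by_cases hS : PySem.Str.startswith (PySem.Str.strip hd) "Songs:" = true
        · -- header "Songs:"
          have hH := pvIsHdr_true_S _ hS
          refine ⟨?_, ?_, ?_⟩ <;> intro ra rs <;> obtain ⟨c, h⟩ := ih3 ra rs
          · refine ⟨c, ?_⟩
            simp only [List.foldl_cons, List.map_cons]
            rw [pv_stepA_hdrS (ra, rs, none) hd hA hS, h,
                pvSkip_cons_hdr _ _ hH, pvSegLoop_cons_S _ _ hA]
            simp [List.append_assoc]
          · refine ⟨c, ?_⟩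
            simp only [List.foldl_cons, List.map_cons]
            rw [pv_stepA_hdrS (ra, rs, some "artists") hd hA hS, h,
                pvTakeBlock_cons_hdr _ _ hH, pvSegLoop_cons_S _ _ hA]
            simp [List.append_assoc]
          · refine ⟨c, ?_⟩
            simp only [List.foldl_cons, List.map_cons]
            rw [pv_stepA_hdrS (ra, rs, some "songs") hd hA hS, h,
                pvTakeBlock_cons_hdr _ _ hH, pvSegLoop_cons_S _ _ hA]
            simp [List.append_assoc]
        · rw [Bool.not_eq_true] at hS
          have hH := pvIsHdr_false _ hA hS
          by_cases hE : PySem.Str.strip hd = ""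
          · -- empty content line: no-op for A, filtered out by B
            refine ⟨?_, ?_, ?_⟩ <;> intro ra rs
            · obtain ⟨c, h⟩ := ih1 ra rs
              refine ⟨c, ?_⟩
              simp only [List.foldl_cons, List.map_cons]
              rw [pv_stepA_empty (ra, rs, none) hd hA hS hE, h, pvSkip_cons_not _ _ hH]
            · obtain ⟨c, h⟩ := ih2 ra rs
              refine ⟨c, ?_⟩
              simp only [List.foldl_cons, List.map_cons]
              rw [pv_stepA_empty (ra, rs, some "artists") hd hA hS hE, h,
                  pvTakeBlock_cons_not _ _ hH, hE]
              simp
            · obtain ⟨c, h⟩ := ih3 ra rs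
              refine ⟨c, ?_⟩
              simp only [List.foldl_cons, List.map_cons]
              rw [pv_stepA_empty (ra, rs, some "songs") hd hA hS hE, h,
                  pvTakeBlock_cons_not _ _ hH, hE]
              simp
          · -- nonempty content line
            refine ⟨?_, ?_, ?_⟩ <;> intro ra rs
            · obtain ⟨c, h⟩ := ih1 ra rs
              refine ⟨c, ?_⟩
              simp only [List.foldl_cons, List.map_cons]
              rw [pv_stepA_none (ra, rs, none) hd hA hS rfl, h, pvSkip_cons_not _ _ hH]
            · obtain ⟨c, h⟩ := ih2 (ra ++ [pvProjArtist (PySem.Str.strip hd)]) rs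
              refine ⟨c, ?_⟩
              simp only [List.foldl_cons, List.map_cons]
              rw [pv_stepA_art (ra, rs, some "artists") hd hA hS hE rfl, h,
                  pvTakeBlock_cons_not _ _ hH]
              simp [bne_iff_ne, hE, List.append_assoc]
            · obtain ⟨c, h⟩ := ih3 ra (rs ++ [pvProjSong (PySem.Str.strip hd)])
              refine ⟨c, ?_⟩
              simp only [List.foldl_cons, List.map_cons]
              rw [pv_stepA_song (ra, rs, some "songs") hd hA hS hE rfl, h,
                  pvTakeBlock_cons_not _ _ hH]
              simp [bne_iff_ne, hE, List.append_assoc]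

-- ===== VERDICT (by name: the statement is the Claim_ definition above) =====
theorem parse_artists_and_songs_spec : Claim_equal_parse_artists_and_songs := by
  intro input_string _ _
  unfold Spec_parse_artists_and_songs parse_artists_and_songs parse_artists_and_songs_alt
  obtain ⟨c, h⟩ := (pv_loop ((PySem.Str.split? (PySem.Str.strip input_string) "\n").getD [])).1 [] []
  simp only [h, List.nil_append]
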